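-- pv_equiv track=rewrite | github.com/GC-HBOC/HerediVar | src/frontend/webapp/io/download_routes.py | decide_for_class_task_force
-- ===== SOURCE A (Python) =====
-- def decide_for_class_task_force(selected_classes):
--     if '1.1' in selected_classes:
--         return 1
--     if '2.1' in selected_classes:
--         return 2
--     if any(x in ['5.1', '5.2', '5.3', '5.4', '5.5', '5.6'] for x in selected_classes):
--         return 5
--     if any(x in ['1.2', '1.3'] for x in selected_classes):
--         return 1
--     if any(x in ['2.2', '2.3', '2.4', '2.5', '2.6', '2.7', '2.8', '2.9', '2.10'] for x in selected_classes):
--         return 2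
--     if any(x in ['4.1', '4.2', '4.3', '4.4', '4.5', '4.6', '4.7', '4.8', '4.9'] for x in selected_classes):
--         return 4
--     #if any(x in ['3.1', '3.2', '3.3', '3.4', '3.5'] for x in selected_classes):
--     #    return 3
--     return 3
-- ===== SOURCE B (Python) =====
-- _GROUPS = [
--     ['1.1'],
--     ['2.1'],
--     ['5.1', '5.2', '5.3', '5.4', '5.5', '5.6'],
--     ['1.2', '1.3'],
--     ['2.2', '2.3', '2.4', '2.5', '2.6', '2.7', '2.8', '2.9', '2.10'],
--     ['4.1', '4.2', '4.3', '4.4', '4.5', '4.6', '4.7', '4.8', '4.9'],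
-- ]
-- _RESULTS = [1, 2, 5, 1, 2, 4, 3]
-- _RANK = {c: r for r, g in enumerate(_GROUPS) for c in g}
--
--
-- def decide_for_class_task_force(selected_classes):
--     # min-reduction: one pass computing the best (lowest) precedence rank
--     best = min((_RANK[c] for c in selected_classes if c in _RANK), default=6)
--     return _RESULTS[best]
-- ===== Notes on version B (the rewrite author's own statement) =====
-- stated objective: faster
-- what changed: Replaces the ordered six-branch membership chain (each branch rescanning the input list) by a single pass that computes the minimum precedence rank of the selected codes via a precomputed code->rank dict and then indexes a rank->result table.
import Mathlib
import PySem

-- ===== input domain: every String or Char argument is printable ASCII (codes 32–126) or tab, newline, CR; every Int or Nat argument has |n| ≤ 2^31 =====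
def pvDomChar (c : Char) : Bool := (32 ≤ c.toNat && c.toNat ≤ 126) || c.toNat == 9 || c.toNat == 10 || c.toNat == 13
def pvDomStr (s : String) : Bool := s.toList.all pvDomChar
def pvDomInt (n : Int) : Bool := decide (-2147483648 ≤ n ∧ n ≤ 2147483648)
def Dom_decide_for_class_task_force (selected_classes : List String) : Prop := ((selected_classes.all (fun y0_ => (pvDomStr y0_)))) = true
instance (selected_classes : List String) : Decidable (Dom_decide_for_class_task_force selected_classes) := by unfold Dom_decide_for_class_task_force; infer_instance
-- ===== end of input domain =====

-- B replaces A's ordered six-branch membership chain (each branch rescanning the input) by a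
-- single pass computing the minimum precedence rank via a code->rank dict, then indexing a
-- rank->result table (objective: faster; a timing run measured B faster).


-- ===== PORT A =====
def decide_for_class_task_force (selected_classes : List String) : Int :=
  if selected_classes.contains "1.1" then 1
  else if selected_classes.contains "2.1" then 2
  else if selected_classes.any (fun x => (["5.1", "5.2", "5.3", "5.4", "5.5", "5.6"] : List String).contains x) then 5
  else if selected_classes.any (fun x => (["1.2", "1.3"] : List String).contains x) then 1
  else if selected_classes.any (fun x => (["2.2", "2.3", "2.4", "2.5", "2.6", "2.7", "2.8", "2.9", "2.10"] : List String).contains x) then 2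
  else if selected_classes.any (fun x => (["4.1", "4.2", "4.3", "4.4", "4.5", "4.6", "4.7", "4.8", "4.9"] : List String).contains x) then 4
  else 3

-- ===== PORT B =====
-- _RANK of Source B: code -> index of its precedence group (dict comprehension, literal result)
def pvRank : PySem.Dict String Int := PySem.Dict.mk
  [ ("1.1", 0), ("2.1", 1),
    ("5.1", 2), ("5.2", 2), ("5.3", 2), ("5.4", 2), ("5.5", 2), ("5.6", 2),
    ("1.2", 3), ("1.3", 3),
    ("2.2", 4), ("2.3", 4), ("2.4", 4), ("2.5", 4), ("2.6", 4), ("2.7", 4), ("2.8", 4), ("2.9", 4), ("2.10", 4),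
    ("4.1", 5), ("4.2", 5), ("4.3", 5), ("4.4", 5), ("4.5", 5), ("4.6", 5), ("4.7", 5), ("4.8", 5), ("4.9", 5) ]

-- _RESULTS of Source B
def pvResults : List Int := [1, 2, 5, 1, 2, 4, 3]

def decide_for_class_task_force_alt (selected_classes : List String) : Int :=
  -- min((_RANK[c] for c in selected_classes if c in _RANK), default=6), ported as a fold
  let best := selected_classes.foldl (fun best c =>
    match PySem.Dict.get? pvRank c with
    | some r => if r < best then r else best
    | none => best) 6
  -- _RESULTS[best]; best is always in [0,6] so the getD default is never used
  (PySem.List.pyGet? pvResults best).getD 0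

-- ===== PRECONDITION & SPEC =====
def Spec_decide_for_class_task_force (selected_classes : List String) (out : Int) : Prop := out = decide_for_class_task_force_alt selected_classes
instance (selected_classes : List String) (out : Int) : Decidable (Spec_decide_for_class_task_force selected_classes out) := by unfold Spec_decide_for_class_task_force; infer_instance

-- ===== CLAIM (what is proved, stated in full; the proofs are below) =====
def Claim_equal_decide_for_class_task_force : Prop := ∀ (selected_classes : List String), Dom_decide_for_class_task_force selected_classes → Spec_decide_for_class_task_force selected_classes (decide_for_class_task_force selected_classes)

-- ===== LEMMAS AND PROOFS =====

-- rank of a single code, with 6 for codes outside the table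
def pvRR (c : String) : Int := (PySem.Dict.get? pvRank c).getD 6

-- the least precedence rank present in sc (6 if none), written as A-style membership chain
def pvR (sc : List String) : Int :=
  if sc.contains "1.1" then 0
  else if sc.contains "2.1" then 1
  else if sc.any (fun x => (["5.1", "5.2", "5.3", "5.4", "5.5", "5.6"] : List String).contains x) then 2
  else if sc.any (fun x => (["1.2", "1.3"] : List String).contains x) then 3
  else if sc.any (fun x => (["2.2", "2.3", "2.4", "2.5", "2.6", "2.7", "2.8", "2.9", "2.10"] : List String).contains x) then 4
  else if sc.any (fun x => (["4.1", "4.2", "4.3", "4.4", "4.5", "4.6", "4.7", "4.8", "4.9"] : List String).contains x) then 5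
  else 6

theorem pvR_le (sc : List String) : pvR sc ≤ 6 := by
  unfold pvR; split_ifs <;> omega

theorem getD_none_of_all (l : List (String × Int)) (c : String)
    (h : ∀ p ∈ l, (p.1 == c) = false) : ((PySem.Dict.mk l).get? c).getD 6 = 6 := by
  induction l with
  | nil => rfl
  | cons p rest ih =>
    rw [PySem.Dict.get?_mk_cons, h p List.mem_cons_self]
    exact ih (fun q hq => h q (List.mem_cons_of_mem _ hq))

set_option maxHeartbeats 4000000 in
theorem pvR_cons (c : String) (sc : List String) : pvR (c :: sc) = min (pvRR c) (pvR sc) := by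
  by_cases h1 : c = "1.1"
  · subst h1
    rw [show pvRR "1.1" = 0 from by decide]
    simp only [pvR, List.contains_cons, List.any_cons, min_def]
    simp
    try split_ifs <;> first | omega | simp_all
  by_cases h2 : c = "2.1"
  · subst h2
    rw [show pvRR "2.1" = 1 from by decide]
    simp only [pvR, List.contains_cons, List.any_cons, min_def]
    simp
    try split_ifs <;> first | omega | simp_all
  by_cases h3 : (["5.1", "5.2", "5.3", "5.4", "5.5", "5.6"] : List String).contains c = true
  · have h3' := h3
    simp only [List.contains_eq_mem, List.mem_cons, List.not_mem_nil, or_false,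
      decide_eq_true_eq] at h3'
    rcases h3' with rfl | rfl | rfl | rfl | rfl | rfl
    · rw [show pvRR "5.1" = 2 from by decide]
      simp only [pvR, List.contains_cons, List.any_cons, min_def]
      simp
      try split_ifs <;> first | omega | simp_all
    · rw [show pvRR "5.2" = 2 from by decide]
      simp only [pvR, List.contains_cons, List.any_cons, min_def]
      simp
      try split_ifs <;> first | omega | simp_all
    · rw [show pvRR "5.3" = 2 from by decide]
      simp only [pvR, List.contains_cons, List.any_cons, min_def]
      simp
      try split_ifs <;> first | omega | simp_all
    · rw [show pvRR "5.4" = 2 from by decide]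
      simp only [pvR, List.contains_cons, List.any_cons, min_def]
      simp
      try split_ifs <;> first | omega | simp_all
    · rw [show pvRR "5.5" = 2 from by decide]
      simp only [pvR, List.contains_cons, List.any_cons, min_def]
      simp
      try split_ifs <;> first | omega | simp_all
    · rw [show pvRR "5.6" = 2 from by decide]
      simp only [pvR, List.contains_cons, List.any_cons, min_def]
      simp
      try split_ifs <;> first | omega | simp_all
  by_cases h4 : (["1.2", "1.3"] : List String).contains c = true
  · have h4' := h4
    simp only [List.contains_eq_mem, List.mem_cons, List.not_mem_nil, or_false,
      decide_eq_true_eq] at h4'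
    rcases h4' with rfl | rfl
    · rw [show pvRR "1.2" = 3 from by decide]
      simp only [pvR, List.contains_cons, List.any_cons, min_def]
      simp
      try split_ifs <;> first | omega | simp_all
    · rw [show pvRR "1.3" = 3 from by decide]
      simp only [pvR, List.contains_cons, List.any_cons, min_def]
      simp
      try split_ifs <;> first | omega | simp_all
  by_cases h5 : (["2.2", "2.3", "2.4", "2.5", "2.6", "2.7", "2.8", "2.9", "2.10"] : List String).contains c = true
  · have h5' := h5
    simp only [List.contains_eq_mem, List.mem_cons, List.not_mem_nil, or_false,
      decide_eq_true_eq] at h5'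
    rcases h5' with rfl | rfl | rfl | rfl | rfl | rfl | rfl | rfl | rfl
    · rw [show pvRR "2.2" = 4 from by decide]
      simp only [pvR, List.contains_cons, List.any_cons, min_def]
      simp
      try split_ifs <;> first | omega | simp_all
    · rw [show pvRR "2.3" = 4 from by decide]
      simp only [pvR, List.contains_cons, List.any_cons, min_def]
      simp
      try split_ifs <;> first | omega | simp_all
    · rw [show pvRR "2.4" = 4 from by decide]
      simp only [pvR, List.contains_cons, List.any_cons, min_def]
      simp
      try split_ifs <;> first | omega | simp_all
    · rw [show pvRR "2.5" = 4 from by decide]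
      simp only [pvR, List.contains_cons, List.any_cons, min_def]
      simp
      try split_ifs <;> first | omega | simp_all
    · rw [show pvRR "2.6" = 4 from by decide]
      simp only [pvR, List.contains_cons, List.any_cons, min_def]
      simp
      try split_ifs <;> first | omega | simp_all
    · rw [show pvRR "2.7" = 4 from by decide]
      simp only [pvR, List.contains_cons, List.any_cons, min_def]
      simp
      try split_ifs <;> first | omega | simp_all
    · rw [show pvRR "2.8" = 4 from by decide]
      simp only [pvR, List.contains_cons, List.any_cons, min_def]
      simp
      try split_ifs <;> first | omega | simp_all
    · rw [show pvRR "2.9" = 4 from by decide]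
      simp only [pvR, List.contains_cons, List.any_cons, min_def]
      simp
      try split_ifs <;> first | omega | simp_all
    · rw [show pvRR "2.10" = 4 from by decide]
      simp only [pvR, List.contains_cons, List.any_cons, min_def]
      simp
      try split_ifs <;> first | omega | simp_all
  by_cases h6 : (["4.1", "4.2", "4.3", "4.4", "4.5", "4.6", "4.7", "4.8", "4.9"] : List String).contains c = true
  · have h6' := h6
    simp only [List.contains_eq_mem, List.mem_cons, List.not_mem_nil, or_false,
      decide_eq_true_eq] at h6'
    rcases h6' with rfl | rfl | rfl | rfl | rfl | rfl | rfl | rfl | rfl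
    · rw [show pvRR "4.1" = 5 from by decide]
      simp only [pvR, List.contains_cons, List.any_cons, min_def]
      simp
      try split_ifs <;> first | omega | simp_all
    · rw [show pvRR "4.2" = 5 from by decide]
      simp only [pvR, List.contains_cons, List.any_cons, min_def]
      simp
      try split_ifs <;> first | omega | simp_all
    · rw [show pvRR "4.3" = 5 from by decide]
      simp only [pvR, List.contains_cons, List.any_cons, min_def]
      simp
      try split_ifs <;> first | omega | simp_all
    · rw [show pvRR "4.4" = 5 from by decide]
      simp only [pvR, List.contains_cons, List.any_cons, min_def]
      simp
      try split_ifs <;> first | omega | simp_all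
    · rw [show pvRR "4.5" = 5 from by decide]
      simp only [pvR, List.contains_cons, List.any_cons, min_def]
      simp
      try split_ifs <;> first | omega | simp_all
    · rw [show pvRR "4.6" = 5 from by decide]
      simp only [pvR, List.contains_cons, List.any_cons, min_def]
      simp
      try split_ifs <;> first | omega | simp_all
    · rw [show pvRR "4.7" = 5 from by decide]
      simp only [pvR, List.contains_cons, List.any_cons, min_def]
      simp
      try split_ifs <;> first | omega | simp_all
    · rw [show pvRR "4.8" = 5 from by decide]
      simp only [pvR, List.contains_cons, List.any_cons, min_def]
      simp
      try split_ifs <;> first | omega | simp_all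
    · rw [show pvRR "4.9" = 5 from by decide]
      simp only [pvR, List.contains_cons, List.any_cons, min_def]
      simp
      try split_ifs <;> first | omega | simp_all
  -- c belongs to no group: its rank is 6 and the head changes nothing
  simp only [List.contains_eq_mem, List.mem_cons, List.not_mem_nil, or_false,
    decide_eq_true_eq, not_or] at h3 h4 h5 h6
  have hRR : pvRR c = 6 := by
    unfold pvRR pvRank
    apply getD_none_of_all
    intro p hp
    simp only [List.mem_cons, List.not_mem_nil, or_false] at hp
    rcases hp with rfl | rfl | rfl | rfl | rfl | rfl | rfl | rfl | rfl | rfl | rfl | rfl | rfl | rfl | rfl | rfl | rfl | rfl | rfl | rfl | rfl | rfl | rfl | rfl | rfl | rfl | rfl | rfl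
    · simp only [beq_eq_false_iff_ne]; exact fun e => h1 e.symm
    · simp only [beq_eq_false_iff_ne]; exact fun e => h2 e.symm
    · simp only [beq_eq_false_iff_ne]; exact fun e => h3.1 e.symm
    · simp only [beq_eq_false_iff_ne]; exact fun e => h3.2.1 e.symm
    · simp only [beq_eq_false_iff_ne]; exact fun e => h3.2.2.1 e.symm
    · simp only [beq_eq_false_iff_ne]; exact fun e => h3.2.2.2.1 e.symm
    · simp only [beq_eq_false_iff_ne]; exact fun e => h3.2.2.2.2.1 e.symm
    · simp only [beq_eq_false_iff_ne]; exact fun e => h3.2.2.2.2.2 e.symm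
    · simp only [beq_eq_false_iff_ne]; exact fun e => h4.1 e.symm
    · simp only [beq_eq_false_iff_ne]; exact fun e => h4.2 e.symm
    · simp only [beq_eq_false_iff_ne]; exact fun e => h5.1 e.symm
    · simp only [beq_eq_false_iff_ne]; exact fun e => h5.2.1 e.symm
    · simp only [beq_eq_false_iff_ne]; exact fun e => h5.2.2.1 e.symm
    · simp only [beq_eq_false_iff_ne]; exact fun e => h5.2.2.2.1 e.symm
    · simp only [beq_eq_false_iff_ne]; exact fun e => h5.2.2.2.2.1 e.symm
    · simp only [beq_eq_false_iff_ne]; exact fun e => h5.2.2.2.2.2.1 e.symm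
    · simp only [beq_eq_false_iff_ne]; exact fun e => h5.2.2.2.2.2.2.1 e.symm
    · simp only [beq_eq_false_iff_ne]; exact fun e => h5.2.2.2.2.2.2.2.1 e.symm
    · simp only [beq_eq_false_iff_ne]; exact fun e => h5.2.2.2.2.2.2.2.2 e.symm
    · simp only [beq_eq_false_iff_ne]; exact fun e => h6.1 e.symm
    · simp only [beq_eq_false_iff_ne]; exact fun e => h6.2.1 e.symm
    · simp only [beq_eq_false_iff_ne]; exact fun e => h6.2.2.1 e.symm
    · simp only [beq_eq_false_iff_ne]; exact fun e => h6.2.2.2.1 e.symm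
    · simp only [beq_eq_false_iff_ne]; exact fun e => h6.2.2.2.2.1 e.symm
    · simp only [beq_eq_false_iff_ne]; exact fun e => h6.2.2.2.2.2.1 e.symm
    · simp only [beq_eq_false_iff_ne]; exact fun e => h6.2.2.2.2.2.2.1 e.symm
    · simp only [beq_eq_false_iff_ne]; exact fun e => h6.2.2.2.2.2.2.2.1 e.symm
    · simp only [beq_eq_false_iff_ne]; exact fun e => h6.2.2.2.2.2.2.2.2 e.symm
  rw [hRR]
  have b0 : (c == "1.1") = false := by
    simp only [beq_eq_false_iff_ne]; exact h1
  have b1 : (c == "2.1") = false := by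
    simp only [beq_eq_false_iff_ne]; exact h2
  have b2 : (c == "5.1") = false := by
    simp only [beq_eq_false_iff_ne]; exact h3.1
  have b3 : (c == "5.2") = false := by
    simp only [beq_eq_false_iff_ne]; exact h3.2.1
  have b4 : (c == "5.3") = false := by
    simp only [beq_eq_false_iff_ne]; exact h3.2.2.1
  have b5 : (c == "5.4") = false := by
    simp only [beq_eq_false_iff_ne]; exact h3.2.2.2.1
  have b6 : (c == "5.5") = false := by
    simp only [beq_eq_false_iff_ne]; exact h3.2.2.2.2.1
  have b7 : (c == "5.6") = false := by
    simp only [beq_eq_false_iff_ne]; exact h3.2.2.2.2.2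
  have b8 : (c == "1.2") = false := by
    simp only [beq_eq_false_iff_ne]; exact h4.1
  have b9 : (c == "1.3") = false := by
    simp only [beq_eq_false_iff_ne]; exact h4.2
  have b10 : (c == "2.2") = false := by
    simp only [beq_eq_false_iff_ne]; exact h5.1
  have b11 : (c == "2.3") = false := by
    simp only [beq_eq_false_iff_ne]; exact h5.2.1
  have b12 : (c == "2.4") = false := by
    simp only [beq_eq_false_iff_ne]; exact h5.2.2.1
  have b13 : (c == "2.5") = false := by
    simp only [beq_eq_false_iff_ne]; exact h5.2.2.2.1
  have b14 : (c == "2.6") = false := by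
    simp only [beq_eq_false_iff_ne]; exact h5.2.2.2.2.1
  have b15 : (c == "2.7") = false := by
    simp only [beq_eq_false_iff_ne]; exact h5.2.2.2.2.2.1
  have b16 : (c == "2.8") = false := by
    simp only [beq_eq_false_iff_ne]; exact h5.2.2.2.2.2.2.1
  have b17 : (c == "2.9") = false := by
    simp only [beq_eq_false_iff_ne]; exact h5.2.2.2.2.2.2.2.1
  have b18 : (c == "2.10") = false := by
    simp only [beq_eq_false_iff_ne]; exact h5.2.2.2.2.2.2.2.2
  have b19 : (c == "4.1") = false := by
    simp only [beq_eq_false_iff_ne]; exact h6.1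
  have b20 : (c == "4.2") = false := by
    simp only [beq_eq_false_iff_ne]; exact h6.2.1
  have b21 : (c == "4.3") = false := by
    simp only [beq_eq_false_iff_ne]; exact h6.2.2.1
  have b22 : (c == "4.4") = false := by
    simp only [beq_eq_false_iff_ne]; exact h6.2.2.2.1
  have b23 : (c == "4.5") = false := by
    simp only [beq_eq_false_iff_ne]; exact h6.2.2.2.2.1
  have b24 : (c == "4.6") = false := by
    simp only [beq_eq_false_iff_ne]; exact h6.2.2.2.2.2.1
  have b25 : (c == "4.7") = false := by
    simp only [beq_eq_false_iff_ne]; exact h6.2.2.2.2.2.2.1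
  have b26 : (c == "4.8") = false := by
    simp only [beq_eq_false_iff_ne]; exact h6.2.2.2.2.2.2.2.1
  have b27 : (c == "4.9") = false := by
    simp only [beq_eq_false_iff_ne]; exact h6.2.2.2.2.2.2.2.2
  simp only [pvR, List.contains_cons, List.any_cons, b0, b1, b2, b3, b4, b5, b6, b7, b8, b9, b10, b11, b12, b13, b14, b15, b16, b17, b18, b19, b20, b21, b22, b23, b24, b25, b26, b27,
    Bool.false_or]
  simp [min_def]
  try split_ifs <;> first | omega | simp_all

-- the fold of port B computes min acc (pvR sc) for acc ≤ 6
theorem pvFold_eq (sc : List String) : ∀ acc : Int, acc ≤ 6 →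
    sc.foldl (fun best c =>
      match PySem.Dict.get? pvRank c with
      | some r => if r < best then r else best
      | none => best) acc = min acc (pvR sc) := by
  induction sc with
  | nil =>
    intro acc hacc
    simp only [List.foldl_nil, pvR, List.contains_nil, List.any_nil, min_def]
    split_ifs <;> first | omega | simp_all
  | cons c sc ih =>
    intro acc hacc
    have hstep : (match PySem.Dict.get? pvRank c with
        | some r => if r < acc then r else acc
        | none => acc) = min acc (pvRR c) := by
      unfold pvRR
      cases h : PySem.Dict.get? pvRank c with
      | none => simp only [Option.getD_none, min_def]; split_ifs <;> first | omega | simp_all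
      | some r => simp only [Option.getD_some, min_def]; split_ifs <;> first | omega | simp_all
    have hle : min acc (pvRR c) ≤ 6 := le_trans (min_le_left _ _) hacc
    rw [List.foldl_cons, hstep, ih _ hle, pvR_cons, min_assoc]

-- ===== VERDICT (by name: the statement is the Claim_ definition above) =====
theorem decide_for_class_task_force_spec : Claim_equal_decide_for_class_task_force := by
  intro sc _
  unfold Spec_decide_for_class_task_force decide_for_class_task_force decide_for_class_task_force_alt
  rw [pvFold_eq sc 6 (by omega)]
  rw [min_eq_right (pvR_le sc)]
  unfold pvR
  split_ifs <;> decide
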